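-- pv_equiv track=rewrite | github.com/dazuiqingwa-bot/dou-ya | scripts/model_panel_refresh.py | clean_model_list_text
-- ===== SOURCE A (Python) =====
-- def clean_model_list_text(text):
--     keep = []
--     started = False
--     for ln in text.splitlines():
--         if ln.startswith('Model'):
--             started = True
--         if started and ln.strip():
--             keep.append(ln.rstrip())
--     return '\n'.join(keep)
-- ===== SOURCE B (Python) =====
-- def clean_model_list_text(text):
--     lines = text.splitlines()
--     keep = [ln.rstrip() for i, ln in enumerate(lines)
--             if ln.strip() and any(l.startswith('Model') for l in lines[:i + 1])]
--     return '\n'.join(keep)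
-- ===== Notes on version B (the rewrite author's own statement) =====
-- stated objective: alternative
-- what changed: Replaces A's stateful started-flag single pass by a stateless per-line criterion: keep line i iff it is nonblank and some line of the prefix lines[:i+1] starts with 'Model' (a nested any-over-prefix scan instead of carried loop state).
import Mathlib
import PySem

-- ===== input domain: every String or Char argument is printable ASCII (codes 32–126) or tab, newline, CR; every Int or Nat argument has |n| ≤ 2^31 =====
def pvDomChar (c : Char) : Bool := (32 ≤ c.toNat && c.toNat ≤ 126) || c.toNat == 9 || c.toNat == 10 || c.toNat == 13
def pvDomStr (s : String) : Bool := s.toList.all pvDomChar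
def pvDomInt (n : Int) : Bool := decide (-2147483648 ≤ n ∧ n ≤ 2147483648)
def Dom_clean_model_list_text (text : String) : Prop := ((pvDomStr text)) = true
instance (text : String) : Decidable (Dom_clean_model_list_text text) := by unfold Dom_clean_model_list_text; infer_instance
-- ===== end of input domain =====

-- B replaces A's stateful started-flag pass by a stateless per-line criterion: keep line i iff it is
-- nonblank and some line of the prefix lines[:i+1] starts with 'Model' (alternative decomposition; B is quadratic).

-- ===== PORT A =====
-- one step of A's loop over the splitlines, state = (keep, started)
def cmlStepA (s : List String × Bool) (ln : String) : List String × Bool :=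
  let started := if PySem.Str.startswith ln "Model" then true else s.2
  if started && !(PySem.Str.strip ln == "") then (s.1 ++ [PySem.Str.rstrip ln], started)
  else (s.1, started)

def clean_model_list_text (text : String) : String :=
  PySem.Str.join "\n" ((PySem.Str.splitlines text).foldl cmlStepA ([], false)).1

-- ===== PORT B =====
-- keep = [ln.rstrip() for i, ln in enumerate(lines) if ln.strip() and any(l.startswith('Model') for l in lines[:i+1])]
def clean_model_list_text_alt (text : String) : String :=
  let lines := PySem.Str.splitlines text
  PySem.Str.join "\n"
    (((PySem.List.enumerate lines).filter
        (fun p => !(PySem.Str.strip p.2 == "") &&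
          (PySem.List.slice lines none (some (p.1 + 1))).any
            (fun l => PySem.Str.startswith l "Model"))).map
      (fun p => PySem.Str.rstrip p.2))

-- ===== PRECONDITION & SPEC =====
def Spec_clean_model_list_text (text : String) (out : String) : Prop := out = clean_model_list_text_alt text
instance (text : String) (out : String) : Decidable (Spec_clean_model_list_text text out) := by unfold Spec_clean_model_list_text; infer_instance

-- ===== CLAIM (what is proved, stated in full; the proofs are below) =====
def Claim_equal_clean_model_list_text : Prop := ∀ (text : String), Dom_clean_model_list_text text → Spec_clean_model_list_text text (clean_model_list_text text)

-- ===== LEMMAS AND PROOFS =====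

-- one step of A's loop, written with the flag update pulled out
lemma cmlStepA_eq (acc : List String) (b : Bool) (r : String) :
    cmlStepA (acc, b) r =
      (if (b || PySem.Str.startswith r "Model") && !(PySem.Str.strip r == "") then acc ++ [PySem.Str.rstrip r] else acc,
       b || PySem.Str.startswith r "Model") := by
  simp only [cmlStepA]
  cases hp : PySem.Str.startswith r "Model" <;> cases b <;> simp <;> split_ifs <;> rfl

-- invariant: processing the suffix R = F.drop s of the full line list F, with A's flag b equal to
-- "some line of F.take s is a header", the fold's kept lines are exactly B's filtered enumeration of R
lemma cml_invariant (R : List String) : ∀ (F : List String) (s : Nat) (b : Bool) (acc : List String),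
    F.drop s = R →
    b = (F.take s).any (fun l => PySem.Str.startswith l "Model") →
    (R.foldl cmlStepA (acc, b)).1
      = acc ++ ((PySem.List.enumerate R (s : Int)).filter
          (fun p => !(PySem.Str.strip p.2 == "") &&
            (PySem.List.slice F none (some (p.1 + 1))).any
              (fun l => PySem.Str.startswith l "Model"))).map
          (fun p => PySem.Str.rstrip p.2) := by
  induction R with
  | nil => intro F s b acc _ _; simp [PySem.List.enumerate_nil]
  | cons r R' ih =>
      intro F s b acc hdrop hb
      have hget : F[s]? = some r := by
        have : (F.drop s)[0]? = some r := by rw [hdrop]; simp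
        simpa using this
      have htake : F.take (s + 1) = F.take s ++ [r] := by
        rw [List.take_add_one, hget]; rfl
      have hdrop' : F.drop (s + 1) = R' := by
        have h1 : F.drop (s + 1) = (F.drop s).drop 1 := by
          rw [List.drop_drop, Nat.add_comm]
        rw [h1, hdrop]; rfl
      have hb' : (b || PySem.Str.startswith r "Model")
          = (F.take (s + 1)).any (fun l => PySem.Str.startswith l "Model") := by
        rw [htake, hb]; simp
      have hslice : PySem.List.slice F none (some ((s : Int) + 1))
          = F.take (s + 1) := by
        have hcast : ((s : Int) + 1) = ((s + 1 : Nat) : Int) := by push_cast; ring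
        rw [hcast, PySem.List.slice_to_natCast]
      have hcond : (!(PySem.Str.strip r == "") &&
            (PySem.List.slice F none (some ((s : Int) + 1))).any (fun l => PySem.Str.startswith l "Model"))
          = (!(PySem.Str.strip r == "") && (b || PySem.Str.startswith r "Model")) := by
        rw [hslice, ← hb']
      have ihh := ih F (s + 1) (b || PySem.Str.startswith r "Model")
        (if (b || PySem.Str.startswith r "Model") && !(PySem.Str.strip r == "") then acc ++ [PySem.Str.rstrip r] else acc)
        hdrop' hb'
      rw [List.foldl_cons, cmlStepA_eq, PySem.List.enumerate_cons, List.filter_cons]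
      have hcast1 : ((s + 1 : Nat) : Int) = (s : Int) + 1 := by push_cast; ring
      rw [hcast1] at ihh
      rw [ihh]
      by_cases hk : ((b || PySem.Str.startswith r "Model") && !(PySem.Str.strip r == "")) = true
      · have hk' : (!(PySem.Str.strip r == "") && (b || PySem.Str.startswith r "Model")) = true := by
          rw [Bool.and_comm] at hk; exact hk
        rw [if_pos hk, if_pos (hcond.trans hk'), List.map_cons]
        simp
      · have hk' : (!(PySem.Str.strip r == "") && (b || PySem.Str.startswith r "Model")) = false := by
          rw [Bool.and_comm] at hk; exact Bool.not_eq_true _ ▸ (Bool.eq_false_iff.mpr hk)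
        rw [if_neg hk]
        rw [if_neg (by rw [hcond, hk']; simp)]

-- ===== VERDICT (by name: the statement is the Claim_ definition above) =====
theorem clean_model_list_text_spec : Claim_equal_clean_model_list_text := by
  intro text _
  unfold Spec_clean_model_list_text clean_model_list_text clean_model_list_text_alt
  have h := cml_invariant (PySem.Str.splitlines text) (PySem.Str.splitlines text) 0 false [] (by simp) (by simp)
  simp only [Nat.cast_zero, List.nil_append] at h
  rw [h]
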